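-- pv_equiv track=rewrite | github.com/honu-shell-utions/python | sandbox/project_euler/001-050/09-pyth_triplet01.py | get_trip_list
-- ===== SOURCE A (Python) =====
-- def get_trip_list(prim_list,limit):
--     trip_list = []
--     for a,b,c in prim_list:
--         trip_list.append([a,b,c])
--         k = 2
--         while k*a + k*b + k*c <= limit:
--             trip_list.append([k*a,k*b,k*c])
--             k += 1
--     return trip_list
-- ===== SOURCE B (Python) =====
-- def get_trip_list(prim_list, limit):
--     # Worklist (explicit stack, DFS) instead of nested loops: each stack entry
--     # carries the base triple and the current scaled triple; successors are
--     # generated by vector ADDITION (no k, no multiplication).  Primitives are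
--     # pushed in reverse so popping from the end preserves A's output order.
--     out = []
--     stack = [(a, b, c, a, b, c) for a, b, c in reversed(prim_list)]
--     while stack:
--         a, b, c, x, y, z = stack.pop()
--         out.append([x, y, z])
--         nx, ny, nz = x + a, y + b, z + c
--         if nx + ny + nz <= limit:
--             stack.append((a, b, c, nx, ny, nz))
--     return out
-- ===== Notes on version B (the rewrite author's own statement) =====
-- stated objective: alternative
-- what changed: Replaces A's nested for/while with multiplicative scaling (k*a,k*b,k*c) by a single flat worklist loop over an explicit stack whose entries carry the current scaled triple, generating successors by vector addition and pushing them back; DFS pop order reproduces A's per-triple ascending output.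
import Mathlib
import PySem

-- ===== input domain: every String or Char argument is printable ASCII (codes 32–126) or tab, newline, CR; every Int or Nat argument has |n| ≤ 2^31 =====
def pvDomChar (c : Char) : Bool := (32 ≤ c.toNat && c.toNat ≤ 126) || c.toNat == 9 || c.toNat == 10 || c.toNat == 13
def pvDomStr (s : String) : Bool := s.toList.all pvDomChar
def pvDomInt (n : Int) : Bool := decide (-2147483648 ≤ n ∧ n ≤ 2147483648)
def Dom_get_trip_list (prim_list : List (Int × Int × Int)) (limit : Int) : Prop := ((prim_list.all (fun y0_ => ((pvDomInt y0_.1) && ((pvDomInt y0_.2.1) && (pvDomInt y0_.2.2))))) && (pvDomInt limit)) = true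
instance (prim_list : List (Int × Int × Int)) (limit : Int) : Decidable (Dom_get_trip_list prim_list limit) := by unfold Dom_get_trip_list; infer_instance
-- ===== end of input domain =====

-- B replaces A's nested for/while with multiplicative scaling by one flat worklist
-- loop over an explicit stack whose successors are generated by vector addition
-- (alternative decomposition, same cost).


-- ===== PORT A =====
-- the inner while loop of A; fuel only makes the recursion total (Pre_ guarantees enough)
def pvLoopA (a b c limit : Int) : Int → Nat → List (List Int)
  | _, 0 => []
  | k, fuel + 1 =>
    if k * a + k * b + k * c ≤ limit then
      [k * a, k * b, k * c] :: pvLoopA a b c limit (k + 1) fuel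
    else []

def get_trip_list (prim_list : List (Int × Int × Int)) (limit : Int) : List (List Int) :=
  prim_list.foldl
    (fun trip_list t =>
      (trip_list ++ [[t.1, t.2.1, t.2.2]]) ++
        pvLoopA t.1 t.2.1 t.2.2 limit 2 (limit.toNat + 1))
    []

-- ===== PORT B =====
-- B's while-stack loop; the Lean list holds the stack TOP-FIRST (Python pops from the
-- end of its list, so Python's reversed-order build plus end-pop = head of this list);
-- fuel only makes the recursion total (Pre_ guarantees enough).
def pvRun (limit : Int) :
    List (Int × Int × Int × Int × Int × Int) → List (List Int) → Nat → List (List Int)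
  | [], out, _ => out
  | _ :: _, out, 0 => out
  | (a, b, c, x, y, z) :: rest, out, fuel + 1 =>
    if (x + a) + (y + b) + (z + c) ≤ limit then
      pvRun limit ((a, b, c, x + a, y + b, z + c) :: rest) (out ++ [[x, y, z]]) fuel
    else
      pvRun limit rest (out ++ [[x, y, z]]) fuel

def get_trip_list_alt (prim_list : List (Int × Int × Int)) (limit : Int) : List (List Int) :=
  pvRun limit
    (prim_list.map (fun t => (t.1, t.2.1, t.2.2, t.1, t.2.1, t.2.2)))
    []
    (prim_list.length * (limit.toNat + 1))

-- ===== PRECONDITION & SPEC =====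
-- Pre_ excludes the triples with non-positive sum s for which 2s ≤ limit: there both
-- Pythons' loops never terminate (A and B diverge), so no value can be claimed.
def Pre_get_trip_list (prim_list : List (Int × Int × Int)) (limit : Int) : Prop :=
  ∀ t ∈ prim_list, 0 < t.1 + t.2.1 + t.2.2 ∨ limit < 2 * (t.1 + t.2.1 + t.2.2)
instance (prim_list : List (Int × Int × Int)) (limit : Int) : Decidable (Pre_get_trip_list prim_list limit) := by unfold Pre_get_trip_list; infer_instance

def pvWitness_get_trip_list : (List (Int × Int × Int)) × Int := ([(3, 4, 5), (5, 12, 13)], 100)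

def Spec_get_trip_list (prim_list : List (Int × Int × Int)) (limit : Int) (out : List (List Int)) : Prop := out = get_trip_list_alt prim_list limit
instance (prim_list : List (Int × Int × Int)) (limit : Int) (out : List (List Int)) : Decidable (Spec_get_trip_list prim_list limit out) := by unfold Spec_get_trip_list; infer_instance

-- ===== CLAIM (what is proved, stated in full; the proofs are below) =====
def Claim_equal_get_trip_list : Prop := ∀ (prim_list : List (Int × Int × Int)) (limit : Int), Dom_get_trip_list prim_list limit → Pre_get_trip_list prim_list limit → Spec_get_trip_list prim_list limit (get_trip_list prim_list limit)

-- ===== LEMMAS AND PROOFS =====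

-- characterisation of A's while loop when the triple sum is positive
theorem pvLoopA_eq (a b c limit : Int) (hs : 0 < a + b + c) :
    ∀ (fuel : Nat) (k : Int),
      (PySem.Int.floordiv limit (a + b + c) + 1 - k).toNat ≤ fuel →
      pvLoopA a b c limit k fuel =
        (PySem.List.pyRange k (PySem.Int.floordiv limit (a + b + c) + 1) 1).map
          (fun k => [k * a, k * b, k * c]) := by
  intro fuel
  induction fuel with
  | zero =>
    intro k hk
    have h : PySem.Int.floordiv limit (a + b + c) + 1 ≤ k := by omega
    rw [PySem.List.pyRange_one_eq_nil h]
    rfl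
  | succ n ih =>
    intro k hk
    have hcond : (k * a + k * b + k * c ≤ limit) ↔ k ≤ PySem.Int.floordiv limit (a + b + c) := by
      rw [PySem.Int.le_floordiv_iff_mul_le hs]
      constructor <;> intro h <;> nlinarith
    by_cases h : k ≤ PySem.Int.floordiv limit (a + b + c)
    · rw [pvLoopA, if_pos (hcond.mpr h),
        PySem.List.pyRange_one_cons (by omega : k < PySem.Int.floordiv limit (a + b + c) + 1),
        List.map_cons, ih (k + 1) (by omega)]
    · rw [pvLoopA, if_neg (fun hc => h (hcond.mp hc)),
        PySem.List.pyRange_one_eq_nil (by omega)]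
      rfl

-- B's stack loop runs one whole chain (DFS: the successor sits on top), then proceeds
-- with the rest of the stack, consuming exactly 1 + (d - k).toNat fuel
theorem pvRun_chain (limit a b c : Int) (hs : 0 < a + b + c) :
    ∀ (f : Nat) (k : Int), 1 ≤ k →
      (PySem.Int.floordiv limit (a + b + c) - k).toNat ≤ f →
      ∀ (rest : List (Int × Int × Int × Int × Int × Int)) (out : List (List Int)),
      pvRun limit ((a, b, c, k * a, k * b, k * c) :: rest) out (f + 1) =
        pvRun limit rest
          (out ++ ([k * a, k * b, k * c] ::
            (PySem.List.pyRange (k + 1) (PySem.Int.floordiv limit (a + b + c) + 1) 1).map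
              (fun j => [j * a, j * b, j * c])))
          (f - (PySem.Int.floordiv limit (a + b + c) - k).toNat) := by
  intro f
  induction f with
  | zero =>
    intro k hk hm rest out
    set d := PySem.Int.floordiv limit (a + b + c) with hd
    have hdk : d ≤ k := by omega
    have hcond : ¬ ((k * a + a) + (k * b + b) + (k * c + c) ≤ limit) := by
      intro hc
      have : k + 1 ≤ d := by
        rw [hd, PySem.Int.le_floordiv_iff_mul_le hs]; nlinarith
      omega
    rw [pvRun, if_neg hcond, PySem.List.pyRange_one_eq_nil (by omega)]
    simp
  | succ n ih =>
    intro k hk hm rest out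
    set d := PySem.Int.floordiv limit (a + b + c) with hd
    by_cases h : k + 1 ≤ d
    · have hcond : (k * a + a) + (k * b + b) + (k * c + c) ≤ limit := by
        have := (PySem.Int.le_floordiv_iff_mul_le hs (q := k + 1)).mp (by omega)
        nlinarith
      rw [pvRun, if_pos hcond]
      have hx : k * a + a = (k + 1) * a := by ring
      have hy : k * b + b = (k + 1) * b := by ring
      have hz : k * c + c = (k + 1) * c := by ring
      rw [hx, hy, hz, ih (k + 1) (by omega) (by omega) rest (out ++ [[k * a, k * b, k * c]])]
      rw [PySem.List.pyRange_one_cons (by omega : k + 1 < d + 1), List.map_cons]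
      have : (n + 1) - (d - k).toNat = n - (d - (k + 1)).toNat := by omega
      rw [this]
      simp
    · have hcond : ¬ ((k * a + a) + (k * b + b) + (k * c + c) ≤ limit) := by
        intro hc
        exact h (by rw [hd, PySem.Int.le_floordiv_iff_mul_le hs]; nlinarith)
      rw [pvRun, if_neg hcond, PySem.List.pyRange_one_eq_nil (by omega)]
      have : (n + 1) - (d - k).toNat = n + 1 := by omega
      rw [this]
      simp

-- running B's loop on the whole worklist equals A's fold, given per-triple fuel limit.toNat + 1
theorem pvRun_eq (limit : Int) :
    ∀ (l : List (Int × Int × Int)) (out : List (List Int)) (F : Nat),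
      (∀ t ∈ l, 0 < t.1 + t.2.1 + t.2.2 ∨ limit < 2 * (t.1 + t.2.1 + t.2.2)) →
      l.length * (limit.toNat + 1) ≤ F →
      pvRun limit (l.map (fun t => (t.1, t.2.1, t.2.2, t.1, t.2.1, t.2.2))) out F =
        l.foldl
          (fun trip_list t =>
            (trip_list ++ [[t.1, t.2.1, t.2.2]]) ++
              pvLoopA t.1 t.2.1 t.2.2 limit 2 (limit.toNat + 1))
          out := by
  intro l
  induction l with
  | nil => intro out F _ _; cases F <;> rfl
  | cons t rest ih =>
    intro out F hpre hF
    obtain ⟨a, b, c⟩ := t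
    have hFsplit : rest.length * (limit.toNat + 1) + (limit.toNat + 1) ≤ F := by
      have : (rest.length + 1) * (limit.toNat + 1)
          = rest.length * (limit.toNat + 1) + (limit.toNat + 1) := by ring
      simpa [List.length_cons, this] using hF
    obtain ⟨F', rfl⟩ : ∃ F', F = F' + 1 := ⟨F - 1, by omega⟩
    by_cases hs : 0 < a + b + c
    · set d := PySem.Int.floordiv limit (a + b + c) with hd
      have hs1 : 1 ≤ a + b + c := hs
      have hdlim : (d - 1).toNat ≤ limit.toNat := by
        by_cases hd1 : 1 ≤ d
        · have hmul : d * (a + b + c) ≤ limit :=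
            (PySem.Int.le_floordiv_iff_mul_le hs).mp (le_refl d)
          have : d ≤ limit := by nlinarith
          omega
        · omega
      have hm : (d - 1).toNat ≤ F' := by omega
      have step := pvRun_chain limit a b c hs F' 1 (le_refl 1) hm
        (rest.map (fun t => (t.1, t.2.1, t.2.2, t.1, t.2.1, t.2.2))) out
      simp only [one_mul] at step
      have h2 : (1 : Int) + 1 = 2 := by norm_num
      rw [h2] at step
      have hfuelA : (d + 1 - 2).toNat ≤ limit.toNat + 1 := by omega
      have hloop := pvLoopA_eq a b c limit hs (limit.toNat + 1) 2 hfuelA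
      rw [List.map_cons, step,
        ih _ _ (fun u hu => hpre u (List.mem_cons_of_mem _ hu)) (by omega),
        List.foldl_cons]
      congr 1
      dsimp only
      rw [hloop]
      simp
    · have hlim : limit < 2 * (a + b + c) :=
        (hpre (a, b, c) (by simp)).resolve_left hs
      have hcond : ¬ ((a + a) + (b + b) + (c + c) ≤ limit) := by omega
      rw [List.map_cons, pvRun, if_neg hcond]
      have hloopnil : pvLoopA a b c limit 2 (limit.toNat + 1) = [] := by
        rw [pvLoopA, if_neg (by intro hc; omega)]
      rw [ih (out ++ [[a, b, c]]) F'
          (fun u hu => hpre u (List.mem_cons_of_mem _ hu)) (by omega)]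
      rw [List.foldl_cons, hloopnil]
      simp

-- ===== VERDICT (by name: the statement is the Claim_ definition above) =====
theorem get_trip_list_spec : Claim_equal_get_trip_list := by
  intro prim_list limit _ hpre
  unfold Spec_get_trip_list get_trip_list get_trip_list_alt
  rw [pvRun_eq limit prim_list [] (prim_list.length * (limit.toNat + 1)) hpre (le_refl _)]
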